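-- pv_equiv track=rewrite | github.com/dirtysalt/codes | leetcode/ju-qing-hong-fa-shi-jian.py | getTriggerTime
-- ===== SOURCE A (Python) =====
-- from typing import List
--
-- def getTriggerTime(increase: List[List[int]], requirements: List[List[int]]) -> List[int]:
--     K = 3
--     rs = [[] for _ in range(K)]
--     for i, xs in enumerate(requirements):
--         for k in range(K):
--             rs[k].append((xs[k], i))
--     for i in range(K):
--         rs[i].sort(reverse=True)
--
--     n = len(requirements)
--     ok = [0] * n
--     ans = [-1] * n
--
--     xs = [0] * K
--     increase.insert(0, [0] * K)
--     for d, x in enumerate(increase):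
--         for k in range(K):
--             xs[k] += x[k]
--
--         for k in range(K):
--             while rs[k] and rs[k][-1][0] <= xs[k]:
--                 i = rs[k][-1][1]
--                 ok[i] += 1
--                 rs[k].pop()
--                 if ok[i] == K:
--                     ans[i] = d
--
--     return ans
-- ===== SOURCE B (Python) =====
-- def getTriggerTime(increase, requirements):
--     K = 3
--     # replicate A's observable side effect on the argument
--     increase.insert(0, [0] * K)
--     # cumulative sums per day: sums[d][k] = sum of increase[0..d][k]
--     sums = []
--     cur = [0] * K
--     for row in increase:
--         cur = [cur[k] + row[k] for k in range(K)]
--         sums.append(cur)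
--     ans = []
--     for req in requirements:
--         worst = 0
--         for k in range(K):
--             day = next((d for d, s in enumerate(sums) if s[k] >= req[k]), -1)
--             if day == -1:
--                 worst = -1
--                 break
--             if day > worst:
--                 worst = day
--         ans.append(worst)
--     return ans
-- ===== Notes on version B (the rewrite author's own statement) =====
-- stated objective: alternative
-- what changed: A sorts the thresholds of each of the 3 attributes descending and sweeps the days once, popping satisfied thresholds and counting per requirement; B instead builds the per-attribute prefix-sum table of the days and, independently for each requirement, scans it forward for the first day each of its 3 thresholds is reached, answering with the maximum of the three first-crossing days (or -1).
import Mathlib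
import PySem

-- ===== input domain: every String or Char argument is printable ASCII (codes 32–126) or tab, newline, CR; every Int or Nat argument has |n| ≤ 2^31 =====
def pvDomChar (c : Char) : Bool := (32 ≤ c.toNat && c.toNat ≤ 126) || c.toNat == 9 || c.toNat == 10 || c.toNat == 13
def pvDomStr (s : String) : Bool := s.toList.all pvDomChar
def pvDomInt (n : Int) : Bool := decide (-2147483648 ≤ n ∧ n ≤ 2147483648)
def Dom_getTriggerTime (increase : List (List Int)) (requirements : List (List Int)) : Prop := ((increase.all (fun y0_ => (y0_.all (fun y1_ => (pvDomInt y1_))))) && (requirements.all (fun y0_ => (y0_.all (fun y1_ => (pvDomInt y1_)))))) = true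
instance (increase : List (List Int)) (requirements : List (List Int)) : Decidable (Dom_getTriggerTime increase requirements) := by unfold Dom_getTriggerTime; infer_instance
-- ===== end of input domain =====

-- B replaces A's sorted-threshold sweep by per-requirement forward scans over a prefix-sum table
-- (alternative decomposition, not claimed faster); both Pythons mutate `increase` identically
-- (insert a zero row at the front), the equivalence proved here is about the return value.


-- ===== PORT A =====

-- the `while rs[k] and rs[k][-1][0] <= xs[k]` pop loop (ok[i] += 1; rs[k].pop(); if ok[i] == K: ans[i] = d)
def popWhile (x d : Int) (rsk : List (Int × Int)) (ok ans : List Int) :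
    List (Int × Int) × List Int × List Int :=
  if h : rsk ≠ [] then
    let ti := rsk.getLast h
    if ti.1 ≤ x then
      let ok' := PySem.List.pySetD ok ti.2 (PySem.List.pyGetD ok ti.2 0 + 1)
      let ans' := if PySem.List.pyGetD ok' ti.2 0 = 3 then PySem.List.pySetD ans ti.2 d else ans
      popWhile x d rsk.dropLast ok' ans'
    else (rsk, ok, ans)
  else (rsk, ok, ans)
  termination_by rsk.length
  decreasing_by
    cases rsk with
    | nil => simp at h
    | cons a l => simp [List.length_dropLast]

-- the body of `for d, x in enumerate(increase)`
def dayStep (st : List Int × List (List (Int × Int)) × List Int × List Int)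
    (dx : Int × List Int) : List Int × List (List (Int × Int)) × List Int × List Int :=
  let xs := (PySem.List.pyRange 0 3 1).foldl
    (fun xs k => PySem.List.pySetD xs k (PySem.List.pyGetD xs k 0 + PySem.List.pyGetD dx.2 k 0)) st.1
  let t := (PySem.List.pyRange 0 3 1).foldl
    (fun (s : List (List (Int × Int)) × List Int × List Int) k =>
      let r := popWhile (PySem.List.pyGetD xs k 0) dx.1 (PySem.List.pyGetD s.1 k []) s.2.1 s.2.2
      (PySem.List.pySetD s.1 k r.1, r.2.1, r.2.2))
    (st.2.1, st.2.2.1, st.2.2.2)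
  (xs, t.1, t.2.1, t.2.2)

def getTriggerTime (increase : List (List Int)) (requirements : List (List Int)) : List Int :=
  let rs : List (List (Int × Int)) :=
    (PySem.List.pyRange 0 3 1).map (fun k =>
      PySem.List.sorted2
        ((PySem.List.enumerate requirements).map (fun p => (PySem.List.pyGetD p.2 k 0, p.1)))
        Prod.fst Prod.snd true)
  let n := requirements.length
  let ok : List Int := List.replicate n 0
  let ans : List Int := List.replicate n (-1)
  let inc := PySem.List.insert increase 0 [0, 0, 0]
  let st := (PySem.List.enumerate inc).foldl dayStep ([0, 0, 0], rs, ok, ans)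
  st.2.2.2

-- ===== PORT B =====

-- next((d for d, s in enumerate(sums) if s[k] >= req[k]), -1)
def altFirstDay (sums : List (List Int)) (k : Int) (t : Int) : Int :=
  match (PySem.List.enumerate sums).find? (fun p => t ≤ PySem.List.pyGetD p.2 k 0) with
  | some p => p.1
  | none => -1

-- the inner `for k in range(K)` loop of B, with its early `break` on a missing threshold
def altScan (sums : List (List Int)) (req : List Int) : List Int → Int → Int
  | [], worst => worst
  | k :: ks, worst =>
    let day := altFirstDay sums k (PySem.List.pyGetD req k 0)
    if day = -1 then -1
    else altScan sums req ks (if worst < day then day else worst)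

def getTriggerTime_alt (increase : List (List Int)) (requirements : List (List Int)) : List Int :=
  let inc := PySem.List.insert increase 0 [0, 0, 0]
  let sums := (inc.foldl (fun (acc : List (List Int) × List Int) row =>
      let cur := (PySem.List.pyRange 0 3 1).map
        (fun k => PySem.List.pyGetD acc.2 k 0 + PySem.List.pyGetD row k 0)
      (acc.1 ++ [cur], cur)) ([], [0, 0, 0])).1
  requirements.map (fun req => altScan sums req (PySem.List.pyRange 0 3 1) 0)

-- ===== PRECONDITION & SPEC =====
-- Pre_ excludes exactly the inputs where the Python A raises IndexError: a row of `increase`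
-- or of `requirements` with fewer than K = 3 entries (index 2 is read on every row).
def Pre_getTriggerTime (increase : List (List Int)) (requirements : List (List Int)) : Prop :=
  (∀ r ∈ increase, 3 ≤ r.length) ∧ (∀ r ∈ requirements, 3 ≤ r.length)
instance (increase : List (List Int)) (requirements : List (List Int)) : Decidable (Pre_getTriggerTime increase requirements) := by unfold Pre_getTriggerTime; infer_instance

def pvWitness_getTriggerTime : List (List Int) × List (List Int) :=
  ([[1, 2, 3], [4, 5, 6]], [[2, 2, 2], [100, 0, 0]])

def Spec_getTriggerTime (increase : List (List Int)) (requirements : List (List Int)) (out : List Int) : Prop := out = getTriggerTime_alt increase requirements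
instance (increase : List (List Int)) (requirements : List (List Int)) (out : List Int) : Decidable (Spec_getTriggerTime increase requirements out) := by unfold Spec_getTriggerTime; infer_instance

-- ===== CLAIM (what is proved, stated in full; the proofs are below) =====
def Claim_equal_getTriggerTime : Prop := ∀ (increase : List (List Int)) (requirements : List (List Int)), Dom_getTriggerTime increase requirements → Pre_getTriggerTime increase requirements → Spec_getTriggerTime increase requirements (getTriggerTime increase requirements)

-- ===== LEMMAS AND PROOFS =====

-- one pop's bookkeeping, and its fold over a popped batch
def upd1 (d : Int) (i : Int) (s : List Int × List Int) : List Int × List Int :=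
  let ok' := PySem.List.pySetD s.1 i (PySem.List.pyGetD s.1 i 0 + 1)
  (ok', if PySem.List.pyGetD ok' i 0 = 3 then PySem.List.pySetD s.2 i d else s.2)
def updFold (d : Int) (l : List (Int × Int)) (s : List Int × List Int) : List Int × List Int :=
  l.foldl (fun s p => upd1 d p.2 s) s

theorem popWhile_eq (x d : Int) (rsk : List (Int × Int)) (ok ans : List Int)
    (h : rsk.Pairwise (fun p q => q.1 ≤ p.1)) :
    popWhile x d rsk ok ans =
      (rsk.filter (fun p => decide (x < p.1)),
       (updFold d ((rsk.filter (fun p => decide (p.1 ≤ x))).reverse) (ok, ans)).1,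
       (updFold d ((rsk.filter (fun p => decide (p.1 ≤ x))).reverse) (ok, ans)).2) := by
  induction rsk using List.reverseRecOn generalizing ok ans with
  | nil => rw [popWhile]; simp [updFold]
  | append_singleton ys p ih =>
    rw [popWhile]
    rw [dif_pos (by simp)]
    simp only [List.getLast_append_singleton]
    have hys : ys.Pairwise (fun p q => q.1 ≤ p.1) := (List.pairwise_append.mp h).1
    have hge : ∀ q ∈ ys, p.1 ≤ q.1 := by
      intro q hq
      exact (List.pairwise_append.mp h).2.2 q hq p (by simp)
    by_cases hc : p.1 ≤ x
    · simp only [if_pos hc, List.dropLast_concat]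
      rw [ih _ _ hys]
      have hnx : ¬ x < p.1 := by omega
      have hf1 : (ys ++ [p]).filter (fun p => decide (x < p.1)) = ys.filter (fun p => decide (x < p.1)) := by
        simp [List.filter_append, hnx]
      have hf2 : ((ys ++ [p]).filter (fun p => decide (p.1 ≤ x))).reverse
          = p :: (ys.filter (fun p => decide (p.1 ≤ x))).reverse := by
        simp [List.filter_append, hc]
      rw [hf1, hf2]
      rfl
    · simp only [if_neg hc]
      have hf1 : (ys ++ [p]).filter (fun p => decide (x < p.1)) = ys ++ [p] := by
        rw [List.filter_eq_self]
        intro q hq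
        simp only [List.mem_append, List.mem_singleton] at hq
        rcases hq with hq | rfl
        · have := hge q hq; simp; omega
        · simp; omega
      have hf2 : (ys ++ [p]).filter (fun p => decide (p.1 ≤ x)) = [] := by
        rw [List.filter_eq_nil_iff]
        intro q hq
        simp only [List.mem_append, List.mem_singleton] at hq
        rcases hq with hq | rfl
        · have := hge q hq; simp; omega
        · simp; omega
      rw [hf1, hf2]
      simp [updFold]

theorem updFold_getD (d : Int) (l : List (Int × Int)) (ok ans : List Int)
    (hnd : (l.map Prod.snd).Nodup)
    (hmem : ∀ p ∈ l, 0 ≤ p.2 ∧ p.2 < (ok.length : Int))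
    (hans : ans.length = ok.length) :
    ((updFold d l (ok, ans)).1.length = ok.length ∧
     (updFold d l (ok, ans)).2.length = ans.length) ∧
    ∀ j : Nat,
      PySem.List.pyGetD (updFold d l (ok, ans)).1 (j : Int) 0 =
        (if ∃ p ∈ l, p.2 = (j : Int) then PySem.List.pyGetD ok (j : Int) 0 + 1
         else PySem.List.pyGetD ok (j : Int) 0) ∧
      PySem.List.pyGetD (updFold d l (ok, ans)).2 (j : Int) 0 =
        (if (∃ p ∈ l, p.2 = (j : Int)) ∧ PySem.List.pyGetD ok (j : Int) 0 + 1 = 3 then d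
         else PySem.List.pyGetD ans (j : Int) 0) := by
  induction l generalizing ok ans with
  | nil => simp [updFold]
  | cons p l ih =>
    have hp := hmem p (by simp)
    have hcast : ((p.2.toNat : Nat) : Int) = p.2 := Int.toNat_of_nonneg hp.1
    have hlt : p.2.toNat < ok.length := by omega
    have hlta : p.2.toNat < ans.length := by omega
    set nk := p.2.toNat with hnk
    have hok1 : PySem.List.pySetD ok p.2 (PySem.List.pyGetD ok p.2 0 + 1)
        = PySem.List.pySetD ok (nk : Int) (PySem.List.pyGetD ok (nk : Int) 0 + 1) := by
      rw [hcast]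
    set ok1 := PySem.List.pySetD ok (nk : Int) (PySem.List.pyGetD ok (nk : Int) 0 + 1) with hok1d
    have hA1 : ∀ m : Nat, PySem.List.pyGetD ok1 (m : Int) 0 =
        if m = nk then PySem.List.pyGetD ok (nk : Int) 0 + 1 else PySem.List.pyGetD ok (m : Int) 0 := by
      intro m
      rw [hok1d, PySem.List.pyGetD_pySetD_natCast _ _ _ _ _ hlt]
    have hval : PySem.List.pyGetD ok1 p.2 0 = PySem.List.pyGetD ok (nk : Int) 0 + 1 := by
      rw [← hcast, hA1]
      simp
    set ans1 := if PySem.List.pyGetD ok1 p.2 0 = 3 then PySem.List.pySetD ans p.2 d else ans with hans1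
    have hstep : updFold d (p :: l) (ok, ans) = updFold d l (ok1, ans1) := by
      simp only [updFold, List.foldl_cons]
      congr 1
      simp only [upd1, hok1, hans1]
    have hB1 : ∀ m : Nat, m ≠ nk →
        PySem.List.pyGetD ans1 (m : Int) 0 = PySem.List.pyGetD ans (m : Int) 0 := by
      intro m hm
      rw [hans1]
      split
      · rw [← hcast, PySem.List.pyGetD_pySetD_natCast _ _ _ _ _ hlta, if_neg hm]
      · rfl
    have hB2 : PySem.List.pyGetD ans1 (nk : Int) 0 =
        if PySem.List.pyGetD ok (nk : Int) 0 + 1 = 3 then d else PySem.List.pyGetD ans (nk : Int) 0 := by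
      rw [hans1, hval]
      split
      · rw [← hcast, PySem.List.pyGetD_pySetD_natCast _ _ _ _ _ hlta]
        simp
      · rfl
    have hlen1 : ok1.length = ok.length := PySem.List.length_pySetD _ _ _
    have hlena1 : ans1.length = ans.length := by
      rw [hans1]
      split
      · exact PySem.List.length_pySetD _ _ _
      · rfl
    have hmem' : ∀ q ∈ l, 0 ≤ q.2 ∧ q.2 < (ok1.length : Int) := by
      intro q hq
      rw [hlen1]
      exact hmem q (by simp [hq])
    have hnd' : (l.map Prod.snd).Nodup := (List.nodup_cons.mp hnd).2
    have hpnot : p.2 ∉ l.map Prod.snd := (List.nodup_cons.mp hnd).1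
    obtain ⟨⟨hl1, hl2⟩, hjs⟩ := ih ok1 ans1 hnd' hmem' (by omega)
    rw [hstep]
    refine ⟨⟨by rw [hl1, hlen1], by rw [hl2, hlena1]⟩, ?_⟩
    intro j
    obtain ⟨hj1, hj2⟩ := hjs j
    by_cases hje : j = nk
    · have hnotl : ¬ ∃ q ∈ l, q.2 = (j : Int) := by
        rintro ⟨q, hq, hq2⟩
        apply hpnot
        have hqp : q.2 = p.2 := by rw [hq2, hje, hcast]
        rw [← hqp]
        exact List.mem_map_of_mem hq
      have hex : ∃ q ∈ p :: l, q.2 = (j : Int) := ⟨p, by simp, by rw [hje, hcast]⟩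
      constructor
      · rw [hj1, if_neg hnotl, if_pos hex, hje, hA1, if_pos rfl]
      · rw [hj2, if_neg (fun h => hnotl h.1), hje, hB2]
        have hex' : ∃ q ∈ p :: l, q.2 = ((nk : Nat) : Int) := ⟨p, by simp, hcast.symm⟩
        by_cases h3 : PySem.List.pyGetD ok ((nk : Nat) : Int) 0 + 1 = 3
        · rw [if_pos h3, if_pos ⟨hex', h3⟩]
        · rw [if_neg h3, if_neg (fun h => h3 h.2)]
    · have hiff : (∃ q ∈ p :: l, q.2 = (j : Int)) ↔ (∃ q ∈ l, q.2 = (j : Int)) := by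
        constructor
        · rintro ⟨q, hq, hq2⟩
          rcases List.mem_cons.mp hq with rfl | hq'
          · exact absurd (by omega : j = nk) hje
          · exact ⟨q, hq', hq2⟩
        · rintro ⟨q, hq, hq2⟩
          exact ⟨q, by simp [hq], hq2⟩
      have hA1j : PySem.List.pyGetD ok1 (j : Int) 0 = PySem.List.pyGetD ok (j : Int) 0 := by
        rw [hA1, if_neg hje]
      constructor
      · rw [hj1, hA1j]
        by_cases hex : ∃ q ∈ l, q.2 = (j : Int)
        · rw [if_pos hex, if_pos (hiff.mpr hex)]
        · rw [if_neg hex, if_neg (fun h => hex (hiff.mp h))]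
      · rw [hj2, hA1j, hB1 j hje]
        by_cases hex : ∃ q ∈ l, q.2 = (j : Int)
        · by_cases h3 : PySem.List.pyGetD ok (j : Int) 0 + 1 = 3
          · rw [if_pos ⟨hex, h3⟩, if_pos ⟨hiff.mpr hex, h3⟩]
          · rw [if_neg (by tauto), if_neg (by tauto)]
        · rw [if_neg (fun h => hex h.1), if_neg (fun h => hex (hiff.mp h.1))]

-- descending lexicographic order maintained by Python's reverse sort of (threshold, index) pairs
def lexGe (p q : Int × Int) : Prop := q.1 < p.1 ∨ (p.1 = q.1 ∧ q.2 ≤ p.2)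

theorem lexGe_trans {a b c : Int × Int} (h1 : lexGe a b) (h2 : lexGe b c) : lexGe a c := by
  unfold lexGe at *
  omega

theorem insertBy_pairwise_lexGe (x : Int × Int) (ys : List (Int × Int))
    (h : ys.Pairwise lexGe) :
    (PySem.List.insertBy
      (fun a b => decide (b.1 < a.1) || (!decide (a.1 < b.1) && decide (b.2 < a.2))) x ys).Pairwise lexGe := by
  induction ys with
  | nil => simp [PySem.List.insertBy, lexGe]
  | cons y ys ih =>
    rw [PySem.List.insertBy.eq_2]
    rcases List.pairwise_cons.mp h with ⟨hy, hys⟩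
    by_cases hb : (decide (y.1 < x.1) || (!decide (x.1 < y.1) && decide (y.2 < x.2))) = true
    · rw [if_pos hb]
      simp at hb
      have hxy : lexGe x y := by unfold lexGe; omega
      refine List.pairwise_cons.mpr ⟨?_, h⟩
      intro z hz
      rcases List.mem_cons.mp hz with rfl | hz'
      · exact hxy
      · exact lexGe_trans hxy (hy z hz')
    · rw [if_neg hb]
      simp at hb
      have hyx : lexGe y x := by unfold lexGe; omega
      refine List.pairwise_cons.mpr ⟨?_, ih hys⟩
      intro z hz
      rcases (PySem.List.insertBy_mem_iff _ _ _ _).mp hz with rfl | hz'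
      · exact hyx
      · exact hy z hz'

theorem sorted2_pairwise_lexGe (xs : List (Int × Int)) :
    (PySem.List.sorted2 xs Prod.fst Prod.snd true).Pairwise lexGe := by
  have key : ∀ (l : List (Int × Int)) (acc : List (Int × Int)), acc.Pairwise lexGe →
      (l.foldl (fun acc x => PySem.List.insertBy
        (fun a b => decide (b.1 < a.1) || (!decide (a.1 < b.1) && decide (b.2 < a.2))) x acc) acc).Pairwise lexGe := by
    intro l
    induction l with
    | nil => intro acc h; exact h
    | cons x l ih =>
      intro acc h
      exact ih _ (insertBy_pairwise_lexGe x acc h)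
  exact key xs [] (by simp)

def gk (row : List Int) (k : Int) : Int := PySem.List.pyGetD row k 0
def sS (inc : List (List Int)) (D : Nat) (k : Int) : Int := ((inc.take D).map (fun r => gk r k)).sum
def tJ (reqs : List (List Int)) (j : Nat) (k : Int) : Int := gk (reqs.getD j []) k
def crossB (inc : List (List Int)) (t : Int) (k : Int) (D : Nat) : Bool :=
  (List.range D).any (fun d => decide (t ≤ sS inc (d + 1) k))
def fcN (inc : List (List Int)) (t : Int) (k : Int) : Nat :=
  (List.range inc.length).findIdx (fun d => decide (t ≤ sS inc (d + 1) k))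
def K3 : List Int := [0, 1, 2]
def rsInit (reqs : List (List Int)) (k : Int) : List (Int × Int) :=
  PySem.List.sorted2
    ((PySem.List.enumerate reqs).map (fun p => (PySem.List.pyGetD p.2 k 0, p.1)))
    Prod.fst Prod.snd true
def rsC (inc reqs : List (List Int)) (k : Int) (D : Nat) : List (Int × Int) :=
  (rsInit reqs k).filter (fun p => ! crossB inc p.1 k D)

theorem mem_rsInit (reqs : List (List Int)) (k : Int) (p : Int × Int) :
    p ∈ rsInit reqs k ↔ ∃ j : Nat, j < reqs.length ∧ p = (tJ reqs j k, (j : Int)) := by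
  rw [rsInit, (PySem.List.sorted2_perm _ _ _ _).mem_iff, List.mem_map]
  constructor
  · rintro ⟨q, hq, rfl⟩
    rcases (PySem.List.mem_enumerate_iff _ _ _).mp hq with ⟨j, hj, rfl⟩
    exact ⟨j, hj, by simp [tJ, gk, List.getD_eq_getElem, hj]⟩
  · rintro ⟨j, hj, rfl⟩
    refine ⟨((j : Int), reqs[j]), (PySem.List.mem_enumerate_iff _ _ _).mpr ⟨j, hj, by simp⟩, ?_⟩
    simp [tJ, gk, List.getD_eq_getElem, hj]

theorem snd_nodup_rsInit (reqs : List (List Int)) (k : Int) :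
    ((rsInit reqs k).map Prod.snd).Nodup := by
  have hperm : ((rsInit reqs k).map Prod.snd).Perm
      (((PySem.List.enumerate reqs).map (fun p => (PySem.List.pyGetD p.2 k 0, p.1))).map Prod.snd) :=
    (PySem.List.sorted2_perm _ _ _ _).map _
  apply hperm.nodup_iff.mpr
  rw [List.map_map]
  have : (Prod.snd ∘ fun p : Int × List Int => (PySem.List.pyGetD p.2 k 0, p.1)) = Prod.fst := rfl
  rw [this, PySem.List.map_fst_enumerate]
  rw [← PySem.List.map_fst_enumerate (xs := reqs) (s := 0)]
  have hpw := PySem.List.pairwise_lt_enumerate (xs := reqs) (s := 0)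
  have h2 : (List.map Prod.fst (PySem.List.enumerate reqs 0)).Pairwise (· < ·) :=
    List.pairwise_map.mpr hpw
  exact List.Pairwise.imp (fun h => ne_of_lt h) h2

theorem pairwise_fst_rsInit (reqs : List (List Int)) (k : Int) :
    (rsInit reqs k).Pairwise (fun p q => q.1 ≤ p.1) := by
  exact (sorted2_pairwise_lexGe _).imp (fun h => by unfold lexGe at h; omega)

theorem crossB_succ (inc : List (List Int)) (t : Int) (k : Int) (D : Nat) :
    crossB inc t k (D + 1) = (crossB inc t k D || decide (t ≤ sS inc (D + 1) k)) := by
  rw [crossB, List.range_succ, List.any_append, crossB]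
  simp

theorem rsC_succ (inc reqs : List (List Int)) (k : Int) (D : Nat) :
    rsC inc reqs k (D + 1) =
      (rsC inc reqs k D).filter (fun p => decide (sS inc (D + 1) k < p.1)) := by
  rw [rsC, rsC, List.filter_filter]
  apply List.filter_congr
  intro p _
  rw [crossB_succ]
  by_cases h1 : crossB inc p.1 k D <;> by_cases h2 : p.1 ≤ sS inc (D + 1) k <;>
    simp [h1, h2] <;> omega

theorem popped_mem (inc reqs : List (List Int)) (k : Int) (D : Nat) (j : Nat) :
    ((j : Int) ∈ ((rsC inc reqs k D).filter (fun p => decide (p.1 ≤ sS inc (D + 1) k))).map Prod.snd)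
      ↔ (j < reqs.length ∧ crossB inc (tJ reqs j k) k D = false ∧ tJ reqs j k ≤ sS inc (D + 1) k) := by
  rw [List.mem_map]
  constructor
  · rintro ⟨p, hp, hsnd⟩
    rw [List.mem_filter] at hp
    obtain ⟨hp1, hp2⟩ := hp
    rw [rsC, List.mem_filter] at hp1
    obtain ⟨hp3, hp4⟩ := hp1
    rcases (mem_rsInit _ _ _).mp hp3 with ⟨j', hj', rfl⟩
    simp only at hsnd
    have hjj : j' = j := by omega
    subst hjj
    refine ⟨hj', by simpa using hp4, by simpa using hp2⟩
  · rintro ⟨hj, hc, ht⟩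
    refine ⟨(tJ reqs j k, (j : Int)), ?_, rfl⟩
    rw [List.mem_filter, rsC, List.mem_filter]
    exact ⟨⟨(mem_rsInit _ _ _).mpr ⟨j, hj, rfl⟩, by simp [hc]⟩, by simp [ht]⟩

theorem fcN_lt (inc : List (List Int)) (t k : Int) (E : Nat) (hE : E ≤ inc.length)
    (h : crossB inc t k E = true) : fcN inc t k < E := by
  rw [crossB, List.any_eq_true] at h
  obtain ⟨d, hd, hp⟩ := h
  rw [List.mem_range] at hd
  by_contra hlt
  push_neg at hlt
  have : d < fcN inc t k := by omega
  have hidx : d < (List.range inc.length).length := by simp; omega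
  have := List.not_of_lt_findIdx (xs := List.range inc.length)
    (p := fun d => decide (t ≤ sS inc (d + 1) k)) (by rw [fcN] at this; exact this)
  rw [List.getElem_range] at this
  simp [hp] at this

theorem fcN_cross (inc : List (List Int)) (t k : Int) (D : Nat) (hD : D < inc.length)
    (hc : crossB inc t k D = false) (ht : t ≤ sS inc (D + 1) k) : fcN inc t k = D := by
  have hmem : ∃ x ∈ List.range inc.length, (fun d => decide (t ≤ sS inc (d + 1) k)) x = true :=
    ⟨D, by simp [hD], by simp [ht]⟩
  have hlt := List.findIdx_lt_length_of_exists hmem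
  rw [List.length_range] at hlt
  have hp : decide (t ≤ sS inc (fcN inc t k + 1) k) = true := by
    have := List.findIdx_getElem (w := by rw [List.length_range]; exact hlt)
      (p := fun d => decide (t ≤ sS inc (d + 1) k)) (xs := List.range inc.length)
    rw [List.getElem_range] at this
    exact this
  rcases Nat.lt_trichotomy (fcN inc t k) D with h | h | h
  · exfalso
    rw [crossB] at hc
    have : ¬ (List.range D).any (fun d => decide (t ≤ sS inc (d + 1) k)) = true := by simp [hc]
    exact this (List.any_eq_true.mpr ⟨fcN inc t k, by simp [h], hp⟩)
  · exact h
  · exfalso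
    have hidx : D < (List.range inc.length).length := by simp [hD]
    have := List.not_of_lt_findIdx (xs := List.range inc.length)
      (p := fun d => decide (t ≤ sS inc (d + 1) k)) (i := D) (by rw [fcN] at h; exact h)
    rw [List.getElem_range] at this
    simp [ht] at this

def maxFcI (inc reqs : List (List Int)) (j : Nat) : Int :=
  K3.foldl (fun a k => max a ((fcN inc (tJ reqs j k) k : Nat) : Int)) 0
def crossP (inc reqs : List (List Int)) (D κ j : Nat) (k : Int) : Bool :=
  crossB inc (tJ reqs j k) k (if k < (κ : Int) then D + 1 else D)
def okP (inc reqs : List (List Int)) (D κ j : Nat) : Int :=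
  ((K3.countP (crossP inc reqs D κ j) : Nat) : Int)
def ansP (inc reqs : List (List Int)) (D κ j : Nat) : Int :=
  if K3.all (crossP inc reqs D κ j) then maxFcI inc reqs j else -1
def okPL (inc reqs : List (List Int)) (D κ : Nat) : List Int :=
  (List.range reqs.length).map (okP inc reqs D κ)
def ansPL (inc reqs : List (List Int)) (D κ : Nat) : List Int :=
  (List.range reqs.length).map (ansP inc reqs D κ)

theorem all_iff_countP3 (f : Int → Bool) : (K3.all f = true) ↔ (K3.countP f = 3) := by
  cases h0 : f 0 <;> cases h1 : f 1 <;> cases h2 : f 2 <;>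
    simp [K3, h0, h1, h2, List.countP_cons]

theorem maxFcI_eq (inc reqs : List (List Int)) (D κ j : Nat) (hD : D < inc.length) (hκ : κ < 3)
    (hall : ∀ k ∈ K3, crossP inc reqs D (κ + 1) j k = true)
    (hb : crossB inc (tJ reqs j (κ : Int)) (κ : Int) D = false)
    (hc : tJ reqs j (κ : Int) ≤ sS inc (D + 1) (κ : Int)) :
    maxFcI inc reqs j = (D : Int) := by
  have hfc : fcN inc (tJ reqs j (κ : Int)) (κ : Int) = D := fcN_cross _ _ _ _ hD hb hc
  have hle : ∀ k ∈ K3, fcN inc (tJ reqs j k) k ≤ D := by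
    intro k hk
    have h := hall k hk
    rw [crossP] at h
    by_cases hlt : k < ((κ + 1 : Nat) : Int)
    · rw [if_pos hlt] at h
      have := fcN_lt inc (tJ reqs j k) k (D + 1) (by omega) h
      omega
    · rw [if_neg hlt] at h
      have := fcN_lt inc (tJ reqs j k) k D (by omega) h
      omega
  have h0 := hle 0 (by simp [K3])
  have h1 := hle 1 (by simp [K3])
  have h2 := hle 2 (by simp [K3])
  rw [maxFcI]
  simp only [K3, List.foldl_cons, List.foldl_nil]
  interval_cases κ
  · rw [(by exact_mod_cast hfc : fcN inc (tJ reqs j 0) 0 = D)]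
    omega
  · rw [(by exact_mod_cast hfc : fcN inc (tJ reqs j 1) 1 = D)]
    omega
  · rw [(by exact_mod_cast hfc : fcN inc (tJ reqs j 2) 2 = D)]
    omega

theorem okP_succ (inc reqs : List (List Int)) (D κ j : Nat) (hκ : κ < 3) :
    okP inc reqs D (κ + 1) j =
      okP inc reqs D κ j +
        (if crossB inc (tJ reqs j (κ : Int)) (κ : Int) D = false ∧
            tJ reqs j (κ : Int) ≤ sS inc (D + 1) (κ : Int) then 1 else 0) := by
  interval_cases κ <;>
  · simp only [okP, crossP, K3, List.countP_cons, List.countP_nil]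
    norm_num
    simp only [crossB_succ]
    by_cases hb : crossB inc (tJ reqs j 0) 0 D <;>
      by_cases hb1 : crossB inc (tJ reqs j 1) 1 D <;>
      by_cases hb2 : crossB inc (tJ reqs j 2) 2 D <;>
      by_cases hc0 : tJ reqs j 0 ≤ sS inc (D + 1) 0 <;>
      by_cases hc1 : tJ reqs j 1 ≤ sS inc (D + 1) 1 <;>
      by_cases hc2 : tJ reqs j 2 ≤ sS inc (D + 1) 2 <;>
      simp [hb, hb1, hb2, hc0, hc1, hc2]

theorem crossP_same (inc reqs : List (List Int)) (D κ j : Nat)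
    (hpop : ¬ (crossB inc (tJ reqs j (κ : Int)) (κ : Int) D = false ∧
        tJ reqs j (κ : Int) ≤ sS inc (D + 1) (κ : Int))) :
    ∀ k ∈ K3, crossP inc reqs D (κ + 1) j k = crossP inc reqs D κ j k := by
  intro k hk
  rw [crossP, crossP]
  by_cases hkκ : k = (κ : Int)
  · subst hkκ
    rw [if_pos (by omega), if_neg (by omega), crossB_succ]
    cases hb : crossB inc (tJ reqs j ((κ : Nat) : Int)) ((κ : Nat) : Int) D
    · simp only [hb, Bool.false_or, decide_eq_true_eq]
      by_cases hc : tJ reqs j ((κ : Nat) : Int) ≤ sS inc (D + 1) ((κ : Nat) : Int)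
      · exact absurd ⟨hb, hc⟩ hpop
      · simp [hc]
    · simp [hb]
  · by_cases hlt : k < (κ : Int)
    · rw [if_pos (by omega), if_pos hlt]
    · rw [if_neg (by omega), if_neg hlt]

theorem ansP_succ (inc reqs : List (List Int)) (D κ j : Nat) (hD : D < inc.length) (hκ : κ < 3) :
    ansP inc reqs D (κ + 1) j =
      if (crossB inc (tJ reqs j (κ : Int)) (κ : Int) D = false ∧
            tJ reqs j (κ : Int) ≤ sS inc (D + 1) (κ : Int)) ∧ okP inc reqs D κ j + 1 = 3
      then (D : Int) else ansP inc reqs D κ j := by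
  by_cases hpop : crossB inc (tJ reqs j (κ : Int)) (κ : Int) D = false ∧
      tJ reqs j (κ : Int) ≤ sS inc (D + 1) (κ : Int)
  · by_cases h3 : okP inc reqs D κ j + 1 = 3
    · rw [if_pos ⟨hpop, h3⟩, ansP]
      have hcnt : okP inc reqs D (κ + 1) j = 3 := by
        rw [okP_succ _ _ _ _ _ hκ, if_pos hpop]
        omega
      have hall : K3.all (crossP inc reqs D (κ + 1) j) = true := by
        rw [all_iff_countP3]
        rw [okP] at hcnt
        omega
      rw [if_pos hall]
      exact maxFcI_eq _ _ _ _ _ hD hκ (List.all_eq_true.mp hall) hpop.1 hpop.2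
    · rw [if_neg (fun h => h3 h.2)]
      have hcnt : okP inc reqs D (κ + 1) j = okP inc reqs D κ j + 1 := by
        rw [okP_succ _ _ _ _ _ hκ, if_pos hpop]
      have hle : K3.countP (crossP inc reqs D κ j) ≤ 3 := by
        have := List.countP_le_length (p := crossP inc reqs D κ j) (l := K3)
        simpa [K3] using this
      have hle2 : K3.countP (crossP inc reqs D (κ + 1) j) ≤ 3 := by
        have := List.countP_le_length (p := crossP inc reqs D (κ + 1) j) (l := K3)
        simpa [K3] using this
      simp only [okP] at h3 hcnt
      rw [ansP, ansP, if_neg, if_neg]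
      · intro hall
        rw [all_iff_countP3] at hall
        omega
      · intro hall
        rw [all_iff_countP3] at hall
        omega
  · rw [if_neg (fun h => hpop h.1)]
    have heq := crossP_same inc reqs D κ j hpop
    rw [ansP, ansP]
    have hall : K3.all (crossP inc reqs D (κ + 1) j) = K3.all (crossP inc reqs D κ j) := by
      simp only [K3, List.all_cons, List.all_nil]
      rw [heq 0 (by simp [K3]), heq 1 (by simp [K3]), heq 2 (by simp [K3])]
    rw [hall]

theorem pyGetD_okPL (inc reqs : List (List Int)) (D κ j : Nat) (hj : j < reqs.length) :
    PySem.List.pyGetD (okPL inc reqs D κ) (j : Int) 0 = okP inc reqs D κ j := by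
  rw [PySem.List.pyGetD_natCast, okPL, List.getD_eq_getElem _ _ (by simp [hj]),
    List.getElem_map, List.getElem_range]

theorem pyGetD_ansPL (inc reqs : List (List Int)) (D κ j : Nat) (hj : j < reqs.length) :
    PySem.List.pyGetD (ansPL inc reqs D κ) (j : Int) 0 = ansP inc reqs D κ j := by
  rw [PySem.List.pyGetD_natCast, ansPL, List.getD_eq_getElem _ _ (by simp [hj]),
    List.getElem_map, List.getElem_range]

theorem popK (inc reqs : List (List Int)) (D κ : Nat) (hD : D < inc.length) (hκ : κ < 3) :
    updFold (D : Int)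
      (((rsC inc reqs (κ : Int) D).filter (fun p => decide (p.1 ≤ sS inc (D + 1) (κ : Int)))).reverse)
      (okPL inc reqs D κ, ansPL inc reqs D κ)
      = (okPL inc reqs D (κ + 1), ansPL inc reqs D (κ + 1)) := by
  set n := reqs.length with hn
  set l := ((rsC inc reqs (κ : Int) D).filter
    (fun p => decide (p.1 ≤ sS inc (D + 1) (κ : Int)))).reverse with hl
  have hmeml : ∀ p ∈ l, ∃ j : Nat, j < n ∧ p = (tJ reqs j (κ : Int), (j : Int)) := by
    intro p hp
    rw [hl, List.mem_reverse, List.mem_filter] at hp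
    have hp1 := hp.1
    rw [rsC, List.mem_filter] at hp1
    exact (mem_rsInit _ _ _).mp hp1.1
  have hsub : (l.map Prod.snd).Nodup := by
    rw [hl, List.map_reverse, List.nodup_reverse]
    have h1 : ((rsC inc reqs (κ : Int) D).filter
        (fun p => decide (p.1 ≤ sS inc (D + 1) (κ : Int)))).Sublist (rsInit reqs (κ : Int)) :=
      List.filter_sublist.trans (by rw [rsC]; exact List.filter_sublist)
    exact (snd_nodup_rsInit reqs (κ : Int)).sublist (h1.map Prod.snd)
  have hlenok : (okPL inc reqs D κ).length = n := by simp [okPL, hn]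
  have hlenans : (ansPL inc reqs D κ).length = n := by simp [ansPL, hn]
  have hmem : ∀ p ∈ l, 0 ≤ p.2 ∧ p.2 < ((okPL inc reqs D κ).length : Int) := by
    intro p hp
    rcases hmeml p hp with ⟨j, hj, rfl⟩
    rw [hlenok]
    refine ⟨by simp, ?_⟩
    show ((j : Nat) : Int) < (n : Int)
    exact_mod_cast hj
  obtain ⟨⟨hl1, hl2⟩, hjs⟩ :=
    updFold_getD (D : Int) l (okPL inc reqs D κ) (ansPL inc reqs D κ) hsub hmem
      (by rw [hlenok, hlenans])
  have hpopj : ∀ j : Nat, j < n →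
      ((∃ p ∈ l, p.2 = (j : Int)) ↔
        (crossB inc (tJ reqs j (κ : Int)) (κ : Int) D = false ∧
         tJ reqs j (κ : Int) ≤ sS inc (D + 1) (κ : Int))) := by
    intro j hj
    have hmm : (∃ p ∈ l, p.2 = (j : Int)) ↔
        ((j : Int) ∈ ((rsC inc reqs (κ : Int) D).filter
          (fun p => decide (p.1 ≤ sS inc (D + 1) (κ : Int)))).map Prod.snd) := by
      rw [hl]
      constructor
      · rintro ⟨p, hp, hp2⟩
        rw [List.mem_reverse] at hp
        exact List.mem_map.mpr ⟨p, hp, hp2⟩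
      · intro hmem'
        rcases List.mem_map.mp hmem' with ⟨p, hp, hp2⟩
        exact ⟨p, List.mem_reverse.mpr hp, hp2⟩
    rw [hmm, popped_mem]
    constructor
    · rintro ⟨_, h2, h3⟩; exact ⟨h2, h3⟩
    · rintro ⟨h2, h3⟩; exact ⟨hj, h2, h3⟩
  have hfst : (updFold (D : Int) l (okPL inc reqs D κ, ansPL inc reqs D κ)).1
      = okPL inc reqs D (κ + 1) := by
    apply List.ext_getElem (by rw [hl1, hlenok]; simp [okPL, hn])
    intro j hja hjb
    have hj : j < n := by rw [hl1, hlenok] at hja; exact hja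
    have hv := (hjs j).1
    rw [PySem.List.pyGetD_natCast, List.getD_eq_getElem _ _ hja] at hv
    have hrhs : (okPL inc reqs D (κ + 1))[j]'hjb = okP inc reqs D (κ + 1) j := by
      simp [okPL]
    rw [hv, hrhs, okP_succ _ _ _ _ _ hκ, pyGetD_okPL _ _ _ _ _ hj]
    by_cases hc : crossB inc (tJ reqs j (κ : Int)) (κ : Int) D = false ∧
        tJ reqs j (κ : Int) ≤ sS inc (D + 1) (κ : Int)
    · rw [if_pos ((hpopj j hj).mpr hc), if_pos hc]
    · rw [if_neg (fun h => hc ((hpopj j hj).mp h)), if_neg hc]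
      omega
  have hsnd : (updFold (D : Int) l (okPL inc reqs D κ, ansPL inc reqs D κ)).2
      = ansPL inc reqs D (κ + 1) := by
    apply List.ext_getElem (by rw [hl2, hlenans]; simp [ansPL, hn])
    intro j hja hjb
    have hj : j < n := by rw [hl2, hlenans] at hja; exact hja
    have hv := (hjs j).2
    rw [PySem.List.pyGetD_natCast, List.getD_eq_getElem _ _ hja] at hv
    have hrhs : (ansPL inc reqs D (κ + 1))[j]'hjb = ansP inc reqs D (κ + 1) j := by
      simp [ansPL]
    rw [hv, hrhs, ansP_succ _ _ _ _ _ hD hκ, pyGetD_okPL _ _ _ _ _ hj,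
      pyGetD_ansPL _ _ _ _ _ hj]
    by_cases hc : (crossB inc (tJ reqs j (κ : Int)) (κ : Int) D = false ∧
        tJ reqs j (κ : Int) ≤ sS inc (D + 1) (κ : Int)) ∧ okP inc reqs D κ j + 1 = 3
    · rw [if_pos ⟨(hpopj j hj).mpr hc.1, hc.2⟩, if_pos hc]
    · rw [if_neg (fun h => hc ⟨(hpopj j hj).mp h.1, h.2⟩), if_neg hc]
  exact Prod.ext hfst hsnd

theorem sS_succ (inc : List (List Int)) (D : Nat) (k : Int) (hD : D < inc.length) :
    sS inc (D + 1) k = sS inc D k + PySem.List.pyGetD inc[D] k 0 := by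
  rw [sS, sS, List.take_add_one, List.map_append, List.sum_append]
  simp [List.getElem?_eq_getElem hD, gk]

def xsL (inc : List (List Int)) (D : Nat) : List Int := [sS inc D 0, sS inc D 1, sS inc D 2]
def canonSt (inc reqs : List (List Int)) (D : Nat) :
    List Int × List (List (Int × Int)) × List Int × List Int :=
  (xsL inc D, [rsC inc reqs 0 D, rsC inc reqs 1 D, rsC inc reqs 2 D],
    okPL inc reqs D 0, ansPL inc reqs D 0)

theorem okP_3 (inc reqs : List (List Int)) (D j : Nat) :
    okP inc reqs D 3 j = okP inc reqs (D + 1) 0 j := by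
  have hc : K3.countP (crossP inc reqs D 3 j) = K3.countP (crossP inc reqs (D + 1) 0 j) := by
    apply List.countP_congr
    intro k hk
    have hk' : k = 0 ∨ k = 1 ∨ k = 2 := by simpa [K3] using hk
    rcases hk' with rfl | rfl | rfl <;> simp [crossP]
  rw [okP, okP, hc]

theorem ansP_3 (inc reqs : List (List Int)) (D j : Nat) :
    ansP inc reqs D 3 j = ansP inc reqs (D + 1) 0 j := by
  rw [ansP, ansP]
  have : K3.all (crossP inc reqs D 3 j) = K3.all (crossP inc reqs (D + 1) 0 j) := by
    simp only [K3, List.all_cons, List.all_nil, crossP]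
    norm_num
  rw [this]

theorem okPL_3 (inc reqs : List (List Int)) (D : Nat) :
    okPL inc reqs D 3 = okPL inc reqs (D + 1) 0 := by
  rw [okPL, okPL]
  exact List.map_congr_left (fun j _ => okP_3 inc reqs D j)

theorem ansPL_3 (inc reqs : List (List Int)) (D : Nat) :
    ansPL inc reqs D 3 = ansPL inc reqs (D + 1) 0 := by
  rw [ansPL, ansPL]
  exact List.map_congr_left (fun j _ => ansP_3 inc reqs D j)

theorem pairwise_rsC (inc reqs : List (List Int)) (k : Int) (D : Nat) :
    (rsC inc reqs k D).Pairwise (fun p q => q.1 ≤ p.1) :=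
  (pairwise_fst_rsInit reqs k).sublist List.filter_sublist

theorem pySetD3_0 {α : Type} (x y z v : α) : PySem.List.pySetD [x, y, z] (0 : Int) v = [v, y, z] := rfl
theorem pySetD3_1 {α : Type} (x y z v : α) : PySem.List.pySetD [x, y, z] (1 : Int) v = [x, v, z] := rfl
theorem pySetD3_2 {α : Type} (x y z v : α) : PySem.List.pySetD [x, y, z] (2 : Int) v = [x, y, v] := rfl
theorem pyGetD3_0 {α : Type} (x y z d : α) : PySem.List.pyGetD [x, y, z] (0 : Int) d = x := rfl
theorem pyGetD3_1 {α : Type} (x y z d : α) : PySem.List.pyGetD [x, y, z] (1 : Int) d = y := rfl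
theorem pyGetD3_2 {α : Type} (x y z d : α) : PySem.List.pyGetD [x, y, z] (2 : Int) d = z := rfl

theorem dayLemma (inc reqs : List (List Int)) (D : Nat) (hD : D < inc.length) :
    dayStep (canonSt inc reqs D) ((D : Int), inc[D]) = canonSt inc reqs (D + 1) := by
  have h0 := popK inc reqs D 0 hD (by norm_num)
  have h1 := popK inc reqs D 1 hD (by norm_num)
  have h2 := popK inc reqs D 2 hD (by norm_num)
  simp only [Nat.cast_zero] at h0
  simp only [Nat.cast_one] at h1
  simp only [Nat.cast_ofNat] at h2
  have hpop : ∀ (k : Int) (ok ans : List Int),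
      popWhile (sS inc (D + 1) k) (D : Int) (rsC inc reqs k D) ok ans =
        (rsC inc reqs k (D + 1),
         (updFold (D : Int) (((rsC inc reqs k D).filter
            (fun p => decide (p.1 ≤ sS inc (D + 1) k))).reverse) (ok, ans)).1,
         (updFold (D : Int) (((rsC inc reqs k D).filter
            (fun p => decide (p.1 ≤ sS inc (D + 1) k))).reverse) (ok, ans)).2) := by
    intro k ok ans
    rw [popWhile_eq _ _ _ _ _ (pairwise_rsC inc reqs k D), rsC_succ]
  rw [dayStep, canonSt, canonSt, xsL, xsL]
  simp only [show PySem.List.pyRange 0 3 1 = [(0 : Int), 1, 2] from rfl,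
    List.foldl_cons, List.foldl_nil]
  simp only [pySetD3_0, pySetD3_1, pySetD3_2, pyGetD3_0, pyGetD3_1, pyGetD3_2]
  rw [← sS_succ _ _ _ hD, ← sS_succ _ _ _ hD, ← sS_succ _ _ _ hD]
  simp only [hpop, h0, h1, h2, pySetD3_0, pySetD3_1, pySetD3_2, pyGetD3_0, pyGetD3_1, pyGetD3_2]
  rw [okPL_3, ansPL_3]

theorem mainFold (inc reqs : List (List Int)) :
    ∀ (E s : Nat), s + E = inc.length →
      (PySem.List.enumerate (inc.drop s) (s : Int)).foldl dayStep (canonSt inc reqs s)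
        = canonSt inc reqs inc.length := by
  intro E
  induction E with
  | zero =>
    intro s hs
    rw [List.drop_eq_nil_iff.mpr (by omega)]
    simp only [PySem.List.enumerate_nil, List.foldl_nil]
    rw [show s = inc.length by omega]
  | succ E ih =>
    intro s hs
    have hsl : s < inc.length := by omega
    rw [List.drop_eq_getElem_cons hsl, PySem.List.enumerate_cons, List.foldl_cons,
      dayLemma _ _ _ hsl]
    have := ih (s + 1) (by omega)
    rw [show ((s : Int) + 1) = (((s + 1 : Nat)) : Int) by push_cast; ring]
    exact this

theorem initState (inc reqs : List (List Int)) :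
    canonSt inc reqs 0 =
      ([0, 0, 0],
       (PySem.List.pyRange 0 3 1).map (fun k =>
         PySem.List.sorted2
           ((PySem.List.enumerate reqs).map (fun p => (PySem.List.pyGetD p.2 k 0, p.1)))
           Prod.fst Prod.snd true),
       List.replicate reqs.length 0, List.replicate reqs.length (-1)) := by
  rw [canonSt]
  have hx : xsL inc 0 = [0, 0, 0] := rfl
  have hrs : ∀ k : Int, rsC inc reqs k 0 = rsInit reqs k := by
    intro k
    rw [rsC]
    exact List.filter_eq_self.mpr (fun p _ => rfl)
  have hok : okPL inc reqs 0 0 = List.replicate reqs.length 0 := by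
    rw [okPL, show okP inc reqs 0 0 = (fun _ => (0 : Int)) from funext (fun j => rfl)]
    simp
  have hans : ansPL inc reqs 0 0 = List.replicate reqs.length (-1) := by
    rw [ansPL, show ansP inc reqs 0 0 = (fun _ => (-1 : Int)) from funext (fun j => rfl)]
    simp
  rw [hx, hok, hans, hrs 0, hrs 1, hrs 2]
  rfl

theorem portA_eq (increase reqs : List (List Int)) :
    getTriggerTime increase reqs =
      ansPL ([0, 0, 0] :: increase) reqs ([0, 0, 0] :: increase).length 0 := by
  rw [getTriggerTime]
  simp only [PySem.List.insert_zero]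
  have h := mainFold ([0, 0, 0] :: increase) reqs ([0, 0, 0] :: increase).length 0 (by omega)
  rw [List.drop_zero] at h
  rw [show ((0 : Nat) : Int) = (0 : Int) from rfl] at h
  rw [initState ([0, 0, 0] :: increase) reqs] at h
  rw [h, canonSt]

theorem curEq (inc : List (List Int)) (s : Nat) (hs : s < inc.length) :
    (PySem.List.pyRange 0 3 1).map
      (fun k => PySem.List.pyGetD (xsL inc s) k 0 + PySem.List.pyGetD inc[s] k 0)
      = xsL inc (s + 1) := by
  show [PySem.List.pyGetD (xsL inc s) 0 0 + PySem.List.pyGetD inc[s] 0 0,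
        PySem.List.pyGetD (xsL inc s) 1 0 + PySem.List.pyGetD inc[s] 1 0,
        PySem.List.pyGetD (xsL inc s) 2 0 + PySem.List.pyGetD inc[s] 2 0] = xsL inc (s + 1)
  rw [xsL, xsL, pyGetD3_0, pyGetD3_1, pyGetD3_2,
    ← sS_succ _ _ _ hs, ← sS_succ _ _ _ hs, ← sS_succ _ _ _ hs]

theorem sumsFold (inc : List (List Int)) :
    ∀ (E s : Nat) (acc1 : List (List Int)), s + E = inc.length →
      ((inc.drop s).foldl (fun (acc : List (List Int) × List Int) row =>
        let cur := (PySem.List.pyRange 0 3 1).map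
          (fun k => PySem.List.pyGetD acc.2 k 0 + PySem.List.pyGetD row k 0)
        (acc.1 ++ [cur], cur)) (acc1, xsL inc s)) =
      (acc1 ++ (List.range E).map (fun d => xsL inc (s + d + 1)), xsL inc inc.length) := by
  intro E
  induction E with
  | zero =>
    intro s acc1 hs
    rw [List.drop_eq_nil_iff.mpr (by omega), List.foldl_nil]
    simp [show s = inc.length by omega]
  | succ E ih =>
    intro s acc1 hs
    have hsl : s < inc.length := by omega
    rw [List.drop_eq_getElem_cons hsl, List.foldl_cons]
    simp only [curEq inc s hsl]
    rw [ih (s + 1) (acc1 ++ [xsL inc (s + 1)]) (by omega)]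
    have hshift : [xsL inc (s + 1)] ++ (List.range E).map (fun d => xsL inc (s + 1 + d + 1))
        = (List.range (E + 1)).map (fun d => xsL inc (s + d + 1)) := by
      rw [List.range_succ_eq_map, List.map_cons, List.map_map, List.singleton_append]
      simp only [Nat.add_zero, Nat.zero_add]
      congr 1
      apply List.map_congr_left
      intro d _
      show xsL inc (s + 1 + d + 1) = xsL inc (s + (d + 1) + 1)
      congr 1
      omega
    rw [List.append_assoc, hshift]

theorem sums_eq (inc : List (List Int)) :
    (inc.foldl (fun (acc : List (List Int) × List Int) row =>
        let cur := (PySem.List.pyRange 0 3 1).map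
          (fun k => PySem.List.pyGetD acc.2 k 0 + PySem.List.pyGetD row k 0)
        (acc.1 ++ [cur], cur)) ([], [0, 0, 0])).1
      = (List.range inc.length).map (fun d => xsL inc (d + 1)) := by
  have h := sumsFold inc inc.length 0 [] (by omega)
  rw [List.drop_zero] at h
  rw [show (xsL inc 0) = [0, 0, 0] from rfl] at h
  rw [h]
  simp

theorem altFirstDay_eq (inc : List (List Int)) (k t : Int)
    (hget : ∀ D, PySem.List.pyGetD (xsL inc D) k 0 = sS inc D k) :
    altFirstDay ((List.range inc.length).map (fun d => xsL inc (d + 1))) k t =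
      if crossB inc t k inc.length then ((fcN inc t k : Nat) : Int) else -1 := by
  set N := inc.length with hN
  set sums := (List.range N).map (fun d => xsL inc (d + 1)) with hsums
  have hlen : (PySem.List.enumerate sums).length = N := by
    rw [PySem.List.length_enumerate, hsums, List.length_map, List.length_range]
  have hgetl : ∀ (i : Nat) (h : i < N),
      (PySem.List.enumerate sums)[i]'(by omega) = ((i : Int), xsL inc (i + 1)) := by
    intro i h
    rw [PySem.List.getElem_enumerate _ _ _ (by omega)]
    congr 1
    · omega
    · simp only [hsums, List.getElem_map, List.getElem_range]
  by_cases hc : crossB inc t k N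
  · have hfc : fcN inc t k < N := fcN_lt inc t k N (by omega) hc
    have hp : decide (t ≤ sS inc (fcN inc t k + 1) k) = true := by
      have := List.findIdx_getElem (w := by rw [List.length_range]; exact hfc)
        (p := fun d => decide (t ≤ sS inc (d + 1) k)) (xs := List.range N)
      rw [List.getElem_range] at this
      exact this
    have hmin : ∀ d, d < fcN inc t k → ¬ (t ≤ sS inc (d + 1) k) := by
      intro d hd
      have := List.not_of_lt_findIdx (xs := List.range N)
        (p := fun d => decide (t ≤ sS inc (d + 1) k)) (i := d) (by rw [fcN] at hd; exact hd)
      rw [List.getElem_range] at this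
      simpa using this
    have hfind : (PySem.List.enumerate sums).find?
        (fun p => decide (t ≤ PySem.List.pyGetD p.2 k 0))
          = some (((fcN inc t k : Nat) : Int), xsL inc (fcN inc t k + 1)) := by
      rw [List.find?_eq_some_iff_getElem]
      refine ⟨by simpa [hget] using hp, fcN inc t k, by omega, hgetl _ hfc, ?_⟩
      intro j hj
      have hjN : j < N := by omega
      rw [hgetl j hjN]
      simpa [hget] using hmin j hj
    rw [altFirstDay, hfind, if_pos hc]
  · have hfind : (PySem.List.enumerate sums).find?
        (fun p => decide (t ≤ PySem.List.pyGetD p.2 k 0)) = none := by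
      rw [List.find?_eq_none]
      intro x hx
      rcases List.mem_iff_getElem.mp hx with ⟨i, hi, rfl⟩
      have hiN : i < N := by omega
      rw [hgetl i hiN]
      simp only [hget]
      rw [crossB] at hc
      intro hcon
      apply hc
      rw [List.any_eq_true]
      exact ⟨i, by simp [hiN], by simpa using hcon⟩
    rw [altFirstDay, hfind, if_neg hc]

theorem ifmax (a b : Int) : (if a < b then b else a) = max a b := by
  split <;> omega

theorem altScan_eq (inc reqs : List (List Int)) (j : Nat) (hj : j < reqs.length) :
    altScan ((List.range inc.length).map (fun d => xsL inc (d + 1))) reqs[j]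
        (PySem.List.pyRange 0 3 1) 0
      = ansP inc reqs inc.length 0 j := by
  have ht : ∀ k : Int, PySem.List.pyGetD reqs[j] k 0 = tJ reqs j k := by
    intro k
    rw [tJ, gk, List.getD_eq_getElem _ _ hj]
  have h0 := altFirstDay_eq inc 0 (tJ reqs j 0) (fun D => by rw [xsL]; exact pyGetD3_0 _ _ _ _)
  have h1 := altFirstDay_eq inc 1 (tJ reqs j 1) (fun D => by rw [xsL]; exact pyGetD3_1 _ _ _ _)
  have h2 := altFirstDay_eq inc 2 (tJ reqs j 2) (fun D => by rw [xsL]; exact pyGetD3_2 _ _ _ _)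
  have hcp : ∀ k : Int, 0 ≤ k →
      crossP inc reqs inc.length 0 j k = crossB inc (tJ reqs j k) k inc.length := by
    intro k hk
    rw [crossP, if_neg (by omega)]
  have hfne : ∀ t k, ¬ (((fcN inc t k : Nat) : Int) = -1) := by
    intro t k
    omega
  show altScan _ _ [(0 : Int), 1, 2] 0 = _
  simp only [altScan, ht, h0, h1, h2]
  rw [ansP]
  simp only [K3, List.all_cons, List.all_nil, hcp 0 (by norm_num), hcp 1 (by norm_num),
    hcp 2 (by norm_num), Bool.and_true]
  rw [maxFcI]
  simp only [K3, List.foldl_cons, List.foldl_nil]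
  by_cases hc0 : crossB inc (tJ reqs j 0) 0 inc.length <;>
    by_cases hc1 : crossB inc (tJ reqs j 1) 1 inc.length <;>
      by_cases hc2 : crossB inc (tJ reqs j 2) 2 inc.length <;>
        simp [hc0, hc1, hc2, hfne, ifmax] <;> omega

theorem portB_eq (increase reqs : List (List Int)) :
    getTriggerTime_alt increase reqs =
      ansPL ([0, 0, 0] :: increase) reqs ([0, 0, 0] :: increase).length 0 := by
  rw [getTriggerTime_alt]
  simp only [PySem.List.insert_zero]
  rw [sums_eq ([0, 0, 0] :: increase)]
  apply List.ext_getElem (by simp [ansPL])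
  intro j h1 h2
  rw [List.getElem_map, altScan_eq _ _ j (by simpa using h1)]
  simp [ansPL]

theorem ports_agree (increase reqs : List (List Int)) :
    getTriggerTime increase reqs = getTriggerTime_alt increase reqs := by
  rw [portA_eq, portB_eq]

-- ===== VERDICT (by name: the statement is the Claim_ definition above) =====
theorem getTriggerTime_spec : Claim_equal_getTriggerTime := by
  intro increase requirements _ _
  exact ports_agree increase requirements
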